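-- pv_equiv track=rewrite | github.com/Dhype7/ForensicsMainHand | src/modules/cryptography/crypto_main.py | ascii_binary_to_text
-- ===== SOURCE A (Python) =====
-- def ascii_binary_to_text(binary):
--     bits = ''.join(b for b in binary if b in '01')
--     chars = []
--     for i in range(0, len(bits), 8):
--         byte = bits[i:i+8]
--         if len(byte) == 8:
--             chars.append(chr(int(byte, 2)))
--     return ''.join(chars)
-- ===== SOURCE B (Python) =====
-- def ascii_binary_to_text(binary):
--     # One streaming pass: accumulate bit value and bit count, emit a char per 8 bits.
--     out = []
--     v = 0
--     cnt = 0
--     for b in binary: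
--         if b == '0' or b == '1':
--             v = v * 2 + (1 if b == '1' else 0)
--             cnt += 1
--             if cnt == 8:
--                 out.append(chr(v))
--                 v = 0
--                 cnt = 0
--     return ''.join(out)
-- ===== Notes on version B (the rewrite author's own statement) =====
-- stated objective: alternative
-- what changed: Replaces A's filter-then-index-windowing (build a filtered string, slice 8-char windows by range(0,len,8), re-parse each with int(byte,2)) by a single streaming pass over the input that accumulates a bit value and bit count and emits a character each time 8 bits have been seen.
import Mathlib
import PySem

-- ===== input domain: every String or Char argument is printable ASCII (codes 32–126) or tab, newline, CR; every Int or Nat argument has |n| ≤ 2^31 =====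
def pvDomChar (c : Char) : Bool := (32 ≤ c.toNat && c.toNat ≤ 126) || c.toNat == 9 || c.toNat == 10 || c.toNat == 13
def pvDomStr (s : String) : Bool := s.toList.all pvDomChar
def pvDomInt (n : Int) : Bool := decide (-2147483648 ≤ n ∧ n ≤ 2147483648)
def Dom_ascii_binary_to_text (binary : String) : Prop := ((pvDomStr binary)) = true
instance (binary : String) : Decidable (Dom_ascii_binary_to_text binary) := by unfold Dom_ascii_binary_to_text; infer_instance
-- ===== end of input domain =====

-- B replaces A's filter + 8-char window slicing + int(byte,2) reparse by one streaming pass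
-- that accumulates a bit value/count and emits a char per 8 bits (alternative decomposition, same cost).


-- ===== PORT A =====
-- 'b in "01"' on a single char is membership among the two characters (exact for 1-char needles)
def ascii_binary_to_text (binary : String) : String :=
  let bits : List Char := binary.toList.filter (fun b => "01".toList.contains b)
  let chars : List Char :=
    (PySem.List.pyRange 0 (PySem.List.len bits) 8).foldl
      (fun chars i =>
        let byte := PySem.List.slice bits (some i) (some (i + 8))
        if PySem.List.len byte = 8 then
          -- int(byte, 2): never a ValueError here (byte is 8 chars from {'0','1'}), so .getD 0 is unreachable
          chars ++ [Char.ofNat ((PySem.Int.ofCharsBase? byte 2).getD 0).toNat]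
        else chars)
      []
  String.ofList chars

-- ===== PORT B =====
def ascii_binary_to_text_alt (binary : String) : String :=
  let st : List Char × Nat × Nat :=
    binary.toList.foldl
      (fun st b =>
        if b == '0' || b == '1' then
          let v := st.2.1 * 2 + (if b == '1' then 1 else 0)
          let cnt := st.2.2 + 1
          if cnt = 8 then (st.1 ++ [Char.ofNat v], 0, 0) else (st.1, v, cnt)
        else st)
      ([], 0, 0)
  String.ofList st.1

-- ===== PRECONDITION & SPEC =====
def Spec_ascii_binary_to_text (binary : String) (out : String) : Prop := out = ascii_binary_to_text_alt binary
instance (binary : String) (out : String) : Decidable (Spec_ascii_binary_to_text binary out) := by unfold Spec_ascii_binary_to_text; infer_instance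

-- ===== CLAIM (what is proved, stated in full; the proofs are below) =====
def Claim_equal_ascii_binary_to_text : Prop := ∀ (binary : String), Dom_ascii_binary_to_text binary → Spec_ascii_binary_to_text binary (ascii_binary_to_text binary)

-- ===== LEMMAS AND PROOFS =====

/-- Value of a big-endian bit string (as B's accumulator computes it). -/
def binVal (bs : List Char) : Nat :=
  bs.foldl (fun v c => v * 2 + (if c == '1' then 1 else 0)) 0

/-- The common characterisation of both programs' output on the filtered bit list. -/
def chunks (bs : List Char) : List Char :=
  if 8 ≤ bs.length then
    Char.ofNat (binVal (bs.take 8)) :: chunks (bs.drop 8)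
  else []
termination_by bs.length
decreasing_by simp; omega

/-- B's loop body after the '0'/'1' guard. -/
def bstep (st : List Char × Nat × Nat) (b : Char) : List Char × Nat × Nat :=
  let v := st.2.1 * 2 + (if b == '1' then 1 else 0)
  let cnt := st.2.2 + 1
  if cnt = 8 then (st.1 ++ [Char.ofNat v], 0, 0) else (st.1, v, cnt)

lemma chunks_eq (bs : List Char) (h : 8 ≤ bs.length) :
    chunks bs = Char.ofNat (binVal (bs.take 8)) :: chunks (bs.drop 8) := by
  rw [chunks, if_pos h]

lemma chunks_short (bs : List Char) (h : ¬ 8 ≤ bs.length) : chunks bs = [] := by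
  rw [chunks, if_neg h]

lemma contains01 (b : Char) : (List.contains ['0', '1'] b) = (b == '0' || b == '1') := by
  simp only [List.contains]
  cases h : b == '0' <;> cases h2 : b == '1' <;> simp [List.elem, h, h2]

lemma exists8 (l : List Char) (h : 8 ≤ l.length) :
    ∃ a b c d e f g i t, l = a :: b :: c :: d :: e :: f :: g :: i :: t := by
  rcases l with _ | ⟨a, _ | ⟨b, _ | ⟨c, _ | ⟨d, _ | ⟨e, _ | ⟨f, _ | ⟨g, _ | ⟨i, t⟩⟩⟩⟩⟩⟩⟩⟩ <;>
    simp at h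
  exact ⟨a, b, c, d, e, f, g, i, t, rfl⟩

lemma byteVal (a b c d e f g i : Char)
    (ha : a = '0' ∨ a = '1') (hb : b = '0' ∨ b = '1') (hc : c = '0' ∨ c = '1')
    (hd : d = '0' ∨ d = '1') (he : e = '0' ∨ e = '1') (hf : f = '0' ∨ f = '1')
    (hg : g = '0' ∨ g = '1') (hi : i = '0' ∨ i = '1') :
    ((PySem.Int.ofCharsBase? [a, b, c, d, e, f, g, i] 2).getD 0).toNat
      = binVal [a, b, c, d, e, f, g, i] := by
  rcases ha with rfl | rfl <;> rcases hb with rfl | rfl <;> rcases hc with rfl | rfl <;>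
    rcases hd with rfl | rfl <;> rcases he with rfl | rfl <;> rcases hf with rfl | rfl <;>
    rcases hg with rfl | rfl <;> rcases hi with rfl | rfl <;> decide

lemma A_loop (L : Nat) : ∀ (bits : List Char), bits.length = L →
    (∀ x ∈ bits, x = '0' ∨ x = '1') → ∀ (acc : List Char),
    (List.range ((bits.length + 7) / 8)).foldl
      (fun chars k =>
        if ((bits.drop (8 * k)).take 8).length = 8 then
          chars ++ [Char.ofNat ((PySem.Int.ofCharsBase? ((bits.drop (8 * k)).take 8) 2).getD 0).toNat]
        else chars) acc
      = acc ++ chunks bits := by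
  induction L using Nat.strong_induction_on with
  | _ L IH =>
    intro bits hL hbin acc
    by_cases h8 : 8 ≤ bits.length
    · -- at least one full chunk
      obtain ⟨m, hm⟩ : ∃ m, (bits.length + 7) / 8 = m + 1 := ⟨(bits.length + 7) / 8 - 1, by omega⟩
      rw [hm, List.range_succ_eq_map, List.foldl_cons, List.foldl_map]
      have htake : ((bits.drop (8 * 0)).take 8).length = 8 := by
        simp [List.length_take]; omega
      rw [if_pos htake]
      have hrw : (fun (chars : List Char) (k : Nat) =>
          if ((bits.drop (8 * k.succ)).take 8).length = 8 then
            chars ++ [Char.ofNat ((PySem.Int.ofCharsBase? ((bits.drop (8 * k.succ)).take 8) 2).getD 0).toNat]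
          else chars)
          = (fun (chars : List Char) (k : Nat) =>
          if (((bits.drop 8).drop (8 * k)).take 8).length = 8 then
            chars ++ [Char.ofNat ((PySem.Int.ofCharsBase? (((bits.drop 8).drop (8 * k)).take 8) 2).getD 0).toNat]
          else chars) := by
        funext chars k
        rw [List.drop_drop]
        have h88 : 8 + 8 * k = 8 * k.succ := by omega
        rw [h88]
      rw [hrw]
      have hmlen : m = ((bits.drop 8).length + 7) / 8 := by
        simp [List.length_drop]; omega
      have hrest := IH (bits.drop 8).length (by simp; omega) (bits.drop 8) rfl
        (fun x hx => hbin x (List.mem_of_mem_drop hx))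
        (acc ++ [Char.ofNat ((PySem.Int.ofCharsBase? ((bits.drop (8 * 0)).take 8) 2).getD 0).toNat])
      rw [hmlen, hrest]
      -- head chunk value
      obtain ⟨a, b, c, d, e, f, g, i, t, ht⟩ := exists8 (bits.take 8) (by simp [List.length_take]; omega)
      have ht' : bits.take 8 = [a, b, c, d, e, f, g, i] := by
        have hlen8 : (bits.take 8).length = 8 := by simp [List.length_take]; omega
        rw [ht] at hlen8 ⊢
        simp at hlen8
        simp [hlen8]
      have hmem : ∀ x ∈ bits.take 8, x = '0' ∨ x = '1' := fun x hx => hbin x (List.mem_of_mem_take hx)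
      rw [ht'] at hmem
      have hv : ((PySem.Int.ofCharsBase? (bits.take 8) 2).getD 0).toNat = binVal (bits.take 8) := by
        rw [ht']
        exact byteVal a b c d e f g i (hmem a (by simp)) (hmem b (by simp)) (hmem c (by simp))
          (hmem d (by simp)) (hmem e (by simp)) (hmem f (by simp)) (hmem g (by simp)) (hmem i (by simp))
      rw [chunks_eq bits h8]
      simp only [Nat.mul_zero, List.drop_zero] at hv ⊢
      rw [hv, List.append_assoc]
      rfl
    · -- no full chunk: at most one (short) slice, nothing appended
      rw [chunks_short bits h8, List.append_nil]
      rcases Nat.eq_zero_or_pos bits.length with h0 | hpos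
      · simp [h0]
      · have h1 : (bits.length + 7) / 8 = 1 := by omega
        rw [h1]
        simp [List.range_succ]
        omega

lemma B_tail (bits : List Char) : ∀ (out : List Char) (v cnt : Nat), cnt + bits.length < 8 →
    (bits.foldl bstep (out, v, cnt)).1 = out := by
  induction bits with
  | nil => intro out v cnt _; rfl
  | cons b bs ih =>
    intro out v cnt h
    simp only [List.foldl_cons, bstep]
    rw [if_neg (by simp at h; omega)]
    exact ih out _ _ (by simp at h ⊢; omega)

lemma B_eight (a b c d e f g i : Char) (out : List Char) (t : List Char) :
    (a :: b :: c :: d :: e :: f :: g :: i :: t).foldl bstep (out, 0, 0)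
      = t.foldl bstep (out ++ [Char.ofNat (binVal [a, b, c, d, e, f, g, i])], 0, 0) := by
  simp [bstep, binVal, List.foldl_cons]

lemma B_loop (L : Nat) : ∀ (bits : List Char), bits.length = L → ∀ (out : List Char),
    (bits.foldl bstep (out, 0, 0)).1 = out ++ chunks bits := by
  induction L using Nat.strong_induction_on with
  | _ L IH =>
    intro bits hL out
    by_cases h8 : 8 ≤ bits.length
    · obtain ⟨a, b, c, d, e, f, g, i, t, ht⟩ := exists8 bits h8
      subst ht
      rw [B_eight]
      have hlt : t.length < L := by simp at hL; omega
      rw [IH t.length (by omega) t rfl]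
      rw [chunks_eq _ h8]
      have htake : (a :: b :: c :: d :: e :: f :: g :: i :: t).take 8 = [a, b, c, d, e, f, g, i] := rfl
      have hdrop : (a :: b :: c :: d :: e :: f :: g :: i :: t).drop 8 = t := rfl
      rw [htake, hdrop, List.append_assoc]
      rfl
    · rw [chunks_short bits h8, List.append_nil]
      exact B_tail bits out 0 0 (by omega)

-- ===== VERDICT (by name: the statement is the Claim_ definition above) =====
theorem ascii_binary_to_text_spec : Claim_equal_ascii_binary_to_text := by
  intro binary _
  unfold Spec_ascii_binary_to_text ascii_binary_to_text ascii_binary_to_text_alt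
  simp only []
  set bits := binary.toList.filter (fun b => "01".toList.contains b) with hbits
  have hbin : ∀ x ∈ bits, x = '0' ∨ x = '1' := by
    intro x hx
    rw [hbits] at hx
    have hc := (List.mem_filter.mp hx).2
    rw [show "01".toList = ['0', '1'] from rfl, contains01] at hc
    rcases Bool.or_eq_true_iff.mp hc with h | h
    · exact Or.inl (by simpa using h)
    · exact Or.inr (by simpa using h)
  have hA : (PySem.List.pyRange 0 (PySem.List.len bits) 8).foldl
      (fun chars i =>
        if PySem.List.len (PySem.List.slice bits (some i) (some (i + 8))) = 8 then
          chars ++ [Char.ofNat ((PySem.Int.ofCharsBase? (PySem.List.slice bits (some i) (some (i + 8))) 2).getD 0).toNat]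
        else chars) []
      = (List.range ((bits.length + 7) / 8)).foldl
      (fun chars k =>
        if ((bits.drop (8 * k)).take 8).length = 8 then
          chars ++ [Char.ofNat ((PySem.Int.ofCharsBase? ((bits.drop (8 * k)).take 8) 2).getD 0).toNat]
        else chars) [] := by
    rw [PySem.List.pyRange_of_pos 0 (PySem.List.len bits) (by norm_num)]
    have hcount : (if (0 : Int) < PySem.List.len bits
        then ((PySem.List.len bits - 0 + 8 - 1) / 8).toNat else 0) = (bits.length + 7) / 8 := by
      simp only [PySem.List.len_eq]
      split <;> omega
    rw [hcount, List.foldl_map]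
    congr 1
    funext chars k
    have hidx2 : (0 : Int) + 8 * (k : Int) + 8 = ((8 * k : Nat) : Int) + ((8 : Nat) : Int) := by
      push_cast; ring
    have hidx : (0 : Int) + 8 * (k : Int) = ((8 * k : Nat) : Int) := by push_cast; ring
    rw [hidx2, hidx, PySem.List.slice_natCast_add]
    have hcond : (PySem.List.len ((bits.drop (8 * k)).take 8) = 8)
        ↔ (((bits.drop (8 * k)).take 8).length = 8) := by
      simp [PySem.List.len_eq]
    simp only [hcond]
  rw [hA, A_loop bits.length bits rfl hbin []]
  have hB : binary.toList.foldl
      (fun (st : List Char × Nat × Nat) b =>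
        if b == '0' || b == '1' then bstep st b else st) ([], 0, 0)
      = bits.foldl bstep ([], 0, 0) := by
    rw [PySem.List.foldl_if_eq_foldl_filter (p := fun b => b == '0' || b == '1') (f := bstep)]
    congr 1
    rw [hbits]
    apply List.filter_congr
    intro x _
    rw [show "01".toList = ['0', '1'] from rfl, contains01]
  simp only [List.nil_append] at *
  rw [show (binary.toList.foldl
      (fun (st : List Char × Nat × Nat) b =>
        if b == '0' || b == '1' then
          if st.2.2 + 1 = 8 then (st.1 ++ [Char.ofNat (st.2.1 * 2 + (if b == '1' then 1 else 0))], 0, 0)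
          else (st.1, st.2.1 * 2 + (if b == '1' then 1 else 0), st.2.2 + 1)
        else st) ([], 0, 0))
      = binary.toList.foldl
      (fun (st : List Char × Nat × Nat) b =>
        if b == '0' || b == '1' then bstep st b else st) ([], 0, 0) from rfl]
  rw [hB, B_loop bits.length bits rfl []]
  simp
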